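-- pv_equiv track=rewrite | github.com/foundry-works/foundry-mcp | tests/core/research/test_binary_content_guard.py | _make_binary_string
-- ===== SOURCE A (Python) =====
-- def _make_binary_string(length: int = 512) -> str:
--     """Create a string that looks like binary data (high non-printable ratio)."""
--     # Mix of non-printable characters to exceed the 10% threshold
--     chars = []
--     for i in range(length):
--         if i % 3 == 0:
--             chars.append(chr(0x01))  # non-printable
--         elif i % 3 == 1:
--             chars.append(chr(0x80))  # non-printable high byte
--         else:
--             chars.append("A")  # printable
--     return "".join(chars)
-- ===== SOURCE B (Python) =====
-- def _make_binary_string(length: int = 512) -> str: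
--     """Create a string that looks like binary data (high non-printable ratio)."""
--     if length <= 0:
--         return ""
--     q, r = divmod(length, 3)
--     tile = "\x01\x80A"
--     return "".join(tile for _ in range(q)) + tile[:r]
-- ===== Notes on version B (the rewrite author's own statement) =====
-- stated objective: alternative
-- what changed: Replaces the per-index loop with its three-way i%3 conditional by divmod tiling: the 3-character tile '\x01\x80A' joined length//3 times plus the first length%3 tile characters.
import Mathlib
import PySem

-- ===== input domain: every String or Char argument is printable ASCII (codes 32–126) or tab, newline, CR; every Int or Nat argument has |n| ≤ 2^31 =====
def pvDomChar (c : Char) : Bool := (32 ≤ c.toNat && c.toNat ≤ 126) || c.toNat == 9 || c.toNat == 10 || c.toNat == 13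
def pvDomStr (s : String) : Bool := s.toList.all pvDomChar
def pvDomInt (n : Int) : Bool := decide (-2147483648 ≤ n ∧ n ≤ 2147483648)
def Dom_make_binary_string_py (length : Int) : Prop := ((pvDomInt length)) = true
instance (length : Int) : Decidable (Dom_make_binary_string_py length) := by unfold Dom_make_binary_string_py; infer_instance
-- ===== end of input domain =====

-- B builds the string by divmod: the 3-char tile "\x01\x80A" repeated length//3 times plus the
-- first length%3 tile characters, instead of A's per-index loop with an i%3 conditional (objective: alternative).
-- Strings are ported as their code-point lists (String.ofList), exact for these characters.

-- ===== PORT A =====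
def make_binary_string_py (length : Int) : String :=
  String.ofList ((PySem.List.pyRange 0 length 1).foldl (fun chars i =>
    if PySem.Int.mod i 3 = 0 then chars ++ [Char.ofNat 0x01]
    else if PySem.Int.mod i 3 = 1 then chars ++ [Char.ofNat 0x80]
    else chars ++ ['A']) [])

-- ===== PORT B =====
def make_binary_string_py_alt (length : Int) : String :=
  if length ≤ 0 then ""
  else
    String.ofList
      (PySem.List.pyRepeat [Char.ofNat 0x01, Char.ofNat 0x80, 'A'] (PySem.Int.floordiv length 3) ++
       PySem.List.slice [Char.ofNat 0x01, Char.ofNat 0x80, 'A'] none (some (PySem.Int.mod length 3)))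

-- ===== PRECONDITION & SPEC =====
def Spec_make_binary_string_py (length : Int) (out : String) : Prop := out = make_binary_string_py_alt length
instance (length : Int) (out : String) : Decidable (Spec_make_binary_string_py length out) := by unfold Spec_make_binary_string_py; infer_instance

-- ===== CLAIM (what is proved, stated in full; the proofs are below) =====
def Claim_equal_make_binary_string_py : Prop := ∀ (length : Int), Dom_make_binary_string_py length → Spec_make_binary_string_py length (make_binary_string_py length)

-- ===== LEMMAS AND PROOFS =====

-- the character A's loop picks at index i
def pvF (i : Int) : Char :=
  if PySem.Int.mod i 3 = 0 then Char.ofNat 0x01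
  else if PySem.Int.mod i 3 = 1 then Char.ofNat 0x80
  else 'A'

-- the same choice, phrased on Nat
def pvG (k : Nat) : Char :=
  if k % 3 = 0 then Char.ofNat 0x01
  else if k % 3 = 1 then Char.ofNat 0x80
  else 'A'

def pvPat : List Char := [Char.ofNat 0x01, Char.ofNat 0x80, 'A']

-- A's character list for a nonnegative length n
def pvL (n : Nat) : List Char := (List.range n).map pvG

theorem pvF_cast (k : Nat) : pvF (k : Int) = pvG k := by
  have h3 : k % 3 = 0 ∨ k % 3 = 1 ∨ k % 3 = 2 := by omega
  rcases h3 with h3 | h3 | h3 <;> simp [pvF, pvG, h3] <;>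
    intros <;> split_ifs <;> first | rfl | omega

theorem pvG_add_three (k : Nat) : pvG (3 + k) = pvG k := by
  simp [pvG]

theorem pvL_step (n : Nat) (h : 3 ≤ n) : pvL n = pvPat ++ pvL (n - 3) := by
  have hn : n = 3 + (n - 3) := by omega
  have h1 : (List.range 3).map pvG = pvPat := by decide
  conv_lhs => rw [pvL, hn, List.range_add]
  rw [List.map_append, List.map_map, h1, pvL]
  congr 1
  apply List.map_congr_left
  intro k _
  simpa using pvG_add_three k

theorem pv_tile_divmod (q r : Nat) (hr : r < 3) :
    pvL (3 * q + r) = (List.flatten (List.replicate q pvPat)) ++ pvPat.take r := by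
  induction q with
  | zero =>
    simp only [Nat.mul_zero, Nat.zero_add, List.replicate_zero, List.flatten_nil, List.nil_append]
    interval_cases r <;> decide
  | succ q ih =>
    have h1 : 3 * (q + 1) + r = 3 + (3 * q + r) := by ring
    rw [h1, pvL_step (3 + (3 * q + r)) (by omega),
      show 3 + (3 * q + r) - 3 = 3 * q + r by omega, ih,
      List.replicate_succ, List.flatten_cons, List.append_assoc]

theorem pv_lists_eq (length : Int) (h : 0 < length) :
    (PySem.List.pyRange 0 length 1).foldl (fun chars i =>
      if PySem.Int.mod i 3 = 0 then chars ++ [Char.ofNat 0x01]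
      else if PySem.Int.mod i 3 = 1 then chars ++ [Char.ofNat 0x80]
      else chars ++ ['A']) [] =
    PySem.List.pyRepeat [Char.ofNat 0x01, Char.ofNat 0x80, 'A'] (PySem.Int.floordiv length 3) ++
      PySem.List.slice [Char.ofNat 0x01, Char.ofNat 0x80, 'A'] none (some (PySem.Int.mod length 3)) := by
  have hstep : (fun (chars : List Char) (i : Int) =>
      if PySem.Int.mod i 3 = 0 then chars ++ [Char.ofNat 0x01]
      else if PySem.Int.mod i 3 = 1 then chars ++ [Char.ofNat 0x80]
      else chars ++ ['A']) = fun chars i => chars ++ [pvF i] := by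
    funext chars i
    simp only [pvF]
    split_ifs <;> rfl
  rw [hstep, PySem.List.foldl_append_singleton_eq_map, List.nil_append]
  obtain ⟨n, rfl⟩ : ∃ n : Nat, length = (n : Int) :=
    ⟨length.toNat, (Int.toNat_of_nonneg (le_of_lt h)).symm⟩
  have hdiv : (PySem.Int.floordiv (n : Int) 3).toNat = n / 3 := by
    simp [PySem.Int.floordiv, Int.fdiv_eq_ediv]
    omega
  have hmod : PySem.Int.mod (n : Int) 3 = ((n % 3 : Nat) : Int) := by
    simp [PySem.Int.mod, Int.fmod_eq_emod]
  rw [PySem.List.pyRepeat, hdiv, hmod, PySem.List.slice_to_natCast]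
  have htile := pv_tile_divmod (n / 3) (n % 3) (by omega)
  rw [show 3 * (n / 3) + n % 3 = n from Nat.div_add_mod n 3] at htile
  simp only [pvPat] at htile
  rw [← htile, pvL, PySem.List.pyRange_one, List.map_map]
  apply List.map_congr_left
  intro k _
  simp only [Function.comp_apply, zero_add]
  exact pvF_cast k

-- ===== VERDICT (by name: the statement is the Claim_ definition above) =====
theorem make_binary_string_py_spec : Claim_equal_make_binary_string_py := by
  intro length _
  unfold Spec_make_binary_string_py make_binary_string_py make_binary_string_py_alt
  by_cases hpos : length ≤ 0
  · rw [if_pos hpos, PySem.List.pyRange_one_eq_nil (by omega)]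
    rfl
  · rw [if_neg hpos]
    exact congrArg String.ofList (pv_lists_eq length (by omega))
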